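-- pv_equiv track=rewrite | github.com/mhrfky/CMPE493-Information-Retrieval-and-NLP | HW2-oneWordSearch/prep.py | replaceAndCaseFolding
-- ===== SOURCE A (Python) =====
-- import string
--
-- def replaceAndCaseFolding(text : str): #removes punctuations
--     text = text.replace('\t', ' ')
--     text = text.replace('\n', ' ')
--
--     for c in string.punctuation:
--         if c != "'":
--             text = text.replace(c, ' ')
--         else:
--             text = text.replace("'s", "")
--
--     return text
-- ===== SOURCE B (Python) =====
-- import string
--
-- def replaceAndCaseFolding(text : str):
--     # one "'s" removal pass, then a single translate pass over a table that maps
--     # every punctuation char except the apostrophe, plus tab and newline, to a space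
--     text = text.replace("'s", "")
--     table = str.maketrans({c: ' ' for c in string.punctuation + '\t\n' if c != "'"})
--     return text.translate(table)
-- ===== Notes on version B (the rewrite author's own statement) =====
-- stated objective: idiomatic
-- what changed: A runs 32 sequential whole-string .replace passes (one per punctuation character plus tab/newline); B removes the possessive suffix (apostrophe followed by s) in one pass and then applies a single str.maketrans/translate table pass mapping every punctuation character except the apostrophe, plus tab and newline, to a space.
import Mathlib
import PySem

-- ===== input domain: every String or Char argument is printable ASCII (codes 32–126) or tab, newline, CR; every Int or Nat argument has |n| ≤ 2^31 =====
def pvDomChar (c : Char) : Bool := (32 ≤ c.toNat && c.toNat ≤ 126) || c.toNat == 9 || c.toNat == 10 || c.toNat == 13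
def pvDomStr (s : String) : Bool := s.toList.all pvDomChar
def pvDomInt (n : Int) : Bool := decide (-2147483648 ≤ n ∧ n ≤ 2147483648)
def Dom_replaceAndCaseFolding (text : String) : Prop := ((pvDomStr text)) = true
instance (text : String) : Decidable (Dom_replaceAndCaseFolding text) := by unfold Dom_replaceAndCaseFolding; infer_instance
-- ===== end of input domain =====

-- B replaces A's 32 sequential .replace passes (one per punctuation character) by a single
-- "'s"-removal pass followed by one table-driven traversal that maps every punctuation
-- character except the apostrophe, plus tab and newline, to a space (str.maketrans/translate).

-- ===== PORT A =====
def replaceAndCaseFolding (text : String) : String :=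
  -- text = text.replace('\t',' '); text = text.replace('\n',' '); for c in string.punctuation: ...
  ("!\"#$%&'()*+,-./:;<=>?@[\\]^_`{|}~".toList).foldl
    (fun t c =>
      if c ≠ '\'' then PySem.Str.replace t (String.ofList [c]) " "
      else PySem.Str.replace t "'s" "")
    (PySem.Str.replace (PySem.Str.replace text "\t" " ") "\n" " ")

-- ===== PORT B =====
-- the translation table of Source B: string.punctuation without the apostrophe, plus '\t' and '\n', each ↦ ' '
def pvTableChars : List Char := "!\"#$%&()*+,-./:;<=>?@[\\]^_`{|}~\t\n".toList
def pvTable (c : Char) : Char := if c ∈ pvTableChars then ' ' else c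

def replaceAndCaseFolding_alt (text : String) : String :=
  String.ofList (((PySem.Str.replace text "'s" "").toList).map pvTable)

-- ===== PRECONDITION & SPEC =====
def Spec_replaceAndCaseFolding (text : String) (out : String) : Prop := out = replaceAndCaseFolding_alt text
instance (text : String) (out : String) : Decidable (Spec_replaceAndCaseFolding text out) := by unfold Spec_replaceAndCaseFolding; infer_instance

-- ===== CLAIM (what is proved, stated in full; the proofs are below) =====
def Claim_equal_replaceAndCaseFolding : Prop := ∀ (text : String), Dom_replaceAndCaseFolding text → Spec_replaceAndCaseFolding text (replaceAndCaseFolding text)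

-- ===== LEMMAS AND PROOFS =====

-- A's fold step, at the character-list level
def pvStep (t : List Char) (c : Char) : List Char :=
  if c ≠ '\'' then PySem.Chars.replace t [c] [' '] else PySem.Chars.replace t ['\'', 's'] []

def applyPunct (ps : List Char) (l : List Char) : List Char := ps.foldl pvStep l

-- substituting every character of ps by a space
def subAll (ps : List Char) (x : Char) : Char := if x ∈ ps then ' ' else x

def pvPre : List Char := ['!', '"', '#', '$', '%', '&']
def pvPost : List Char :=
  ['(', ')', '*', '+', ',', '-', '.', '/', ':', ';', '<', '=', '>', '?', '@',
   '[', '\\', ']', '^', '_', '`', '{', '|', '}', '~']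

theorem tl_tab : ("\t" : String).toList = ['\t'] := by decide
theorem tl_nl : ("\n" : String).toList = ['\n'] := by decide
theorem tl_sp : (" " : String).toList = [' '] := by decide
theorem tl_aps : ("'s" : String).toList = ['\'', 's'] := by decide
theorem tl_emp : ("" : String).toList = [] := by decide

-- replacing a single character is a character-wise map
theorem go_single (c d : Char) : ∀ (fuel : Nat) (l acc : List Char), l.length ≤ fuel →
    PySem.Chars.replace.go [c] [d] fuel l acc
      = acc.reverse ++ l.map (fun x => if x = c then d else x) := by
  intro fuel
  induction fuel with
  | zero => intro l acc h; cases l with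
    | nil => simp [PySem.Chars.replace.go]
    | cons a t => simp at h
  | succ n ih =>
    intro l acc h
    cases l with
    | nil => simp [PySem.Chars.replace.go]
    | cons a t =>
      simp only [PySem.Chars.replace.go]
      by_cases hac : a = c
      · subst hac
        have hp : [a].isPrefixOf (a :: t) = true := by simp [List.isPrefixOf]
        simp only [hp, if_true, List.length_singleton, List.drop_succ_cons, List.drop_zero,
          List.reverse_singleton, List.singleton_append]
        rw [ih t (d :: acc) (by simpa using h)]
        simp [List.map_cons]
      · have hp : [c].isPrefixOf (a :: t) = false := by
          simp [List.isPrefixOf]; exact fun h' => hac h'.symm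
        simp only [hp, Bool.false_eq_true, if_false]
        rw [ih t (a :: acc) (by simpa using h)]
        simp [hac]

theorem replace_single (l : List Char) (c d : Char) :
    PySem.Chars.replace l [c] [d] = l.map (fun x => if x = c then d else x) := by
  rw [PySem.Chars.replace]
  simp only [List.isEmpty_cons, Bool.false_eq_true, if_false]
  exact go_single c d l.length l [] (le_refl _)

theorem replace_single_subAll (l : List Char) (c : Char) :
    PySem.Chars.replace l [c] [' '] = l.map (subAll [c]) := by
  rw [replace_single]
  refine List.map_congr_left fun x _ => ?_
  simp [subAll]

-- removing "'s" commutes with any map that fixes '\'' and 's' and hits them only from themselves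
theorem go_rem_map (f : Char → Char)
    (h1 : ∀ x, f x = '\'' ↔ x = '\'') (h2 : ∀ x, f x = 's' ↔ x = 's') :
    ∀ (fuel : Nat) (l acc : List Char),
    PySem.Chars.replace.go ['\'', 's'] [] fuel (l.map f) (acc.map f)
      = (PySem.Chars.replace.go ['\'', 's'] [] fuel l acc).map f := by
  have hf1 : f '\'' = '\'' := (h1 _).mpr rfl
  have hf2 : f 's' = 's' := (h2 _).mpr rfl
  intro fuel
  induction fuel with
  | zero => intro l acc; simp [PySem.Chars.replace.go]
  | succ n ih =>
    intro l acc
    cases l with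
    | nil => simp [PySem.Chars.replace.go]
    | cons a t =>
      simp only [List.map_cons, PySem.Chars.replace.go]
      have hpref : ['\'', 's'].isPrefixOf (f a :: (t.map f)) = ['\'', 's'].isPrefixOf (a :: t) := by
        cases t with
        | nil => simp [List.isPrefixOf]
        | cons b u =>
          simp only [List.map_cons, List.isPrefixOf, Bool.and_true]
          by_cases h : a = '\'' <;> by_cases h' : b = 's'
          · subst h; subst h'; simp [hf1, hf2]
          · subst h
            have : f b ≠ 's' := fun hh => h' ((h2 b).mp hh)
            simp [hf1, this, h', eq_comm]
          · subst h'
            have : f a ≠ '\'' := fun hh => h ((h1 a).mp hh)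
            simp [hf2, this, h, eq_comm]
          · have g1 : f a ≠ '\'' := fun hh => h ((h1 a).mp hh)
            have e1 : ('\'' == a) = false := beq_eq_false_iff_ne.mpr (Ne.symm h)
            have e2 : ('\'' == f a) = false := beq_eq_false_iff_ne.mpr (Ne.symm g1)
            rw [e1, e2]; simp
      rw [hpref]
      by_cases hp : ['\'', 's'].isPrefixOf (a :: t) = true
      · rw [if_pos hp, if_pos hp]
        cases t with
        | nil => simp [List.isPrefixOf] at hp
        | cons b u => simpa using ih u acc
      · rw [if_neg hp, if_neg hp]
        simpa using ih t (a :: acc)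

theorem rem_map (f : Char → Char)
    (h1 : ∀ x, f x = '\'' ↔ x = '\'') (h2 : ∀ x, f x = 's' ↔ x = 's') (l : List Char) :
    PySem.Chars.replace (l.map f) ['\'', 's'] []
      = (PySem.Chars.replace l ['\'', 's'] []).map f := by
  rw [PySem.Chars.replace, PySem.Chars.replace]
  simp only [List.isEmpty_cons, Bool.false_eq_true, if_false, List.length_map]
  simpa using go_rem_map f h1 h2 l.length l []

theorem subAll_h1 (ps : List Char) (h : '\'' ∉ ps) :
    ∀ x, subAll ps x = '\'' ↔ x = '\'' := by
  intro x
  unfold subAll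
  by_cases hx : x ∈ ps
  · simp only [hx, if_true]
    constructor
    · intro h'; exact absurd h' (by decide)
    · intro h'; exact absurd (h' ▸ hx) h
  · simp [hx]

theorem subAll_h2 (ps : List Char) (h : 's' ∉ ps) :
    ∀ x, subAll ps x = 's' ↔ x = 's' := by
  intro x
  unfold subAll
  by_cases hx : x ∈ ps
  · simp only [hx, if_true]
    constructor
    · intro h'; exact absurd h' (by decide)
    · intro h'; exact absurd (h' ▸ hx) h
  · simp [hx]

theorem subAll_comp (ps qs : List Char) (h : ' ' ∉ qs) :
    ∀ x, subAll qs (subAll ps x) = subAll (ps ++ qs) x := by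
  intro x
  unfold subAll
  by_cases hx : x ∈ ps
  · simp [hx, h]
  · simp [hx, List.mem_append]

-- the punctuation fold without the apostrophe case is one charwise substitution pass
theorem applyPunct_no_apos (ps : List Char) (h1 : '\'' ∉ ps) (h2 : ' ' ∉ ps) :
    ∀ l, applyPunct ps l = l.map (subAll ps) := by
  induction ps with
  | nil =>
    intro l
    simp only [applyPunct, List.foldl_nil]
    rw [List.map_congr_left (fun x _ => (by simp [subAll] : subAll [] x = id x)), List.map_id]
  | cons c ps ih =>
    intro l
    have hc : c ≠ '\'' := fun h => h1 (h ▸ List.mem_cons_self ..)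
    have hps1 : '\'' ∉ ps := fun h => h1 (List.mem_cons_of_mem _ h)
    have hps2 : ' ' ∉ ps := fun h => h2 (List.mem_cons_of_mem _ h)
    simp only [applyPunct, List.foldl_cons, pvStep, hc, ne_eq, not_false_eq_true, if_true]
    rw [replace_single_subAll]
    rw [show (ps.foldl pvStep (l.map (subAll [c]))) = applyPunct ps (l.map (subAll [c])) from rfl,
      ih hps1 hps2, List.map_map]
    refine List.map_congr_left fun x _ => ?_
    rw [Function.comp_apply, subAll_comp [c] ps hps2 x]
    rfl

theorem applyPunct_append (ps qs l : List Char) :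
    applyPunct (ps ++ qs) l = applyPunct qs (applyPunct ps l) := by
  simp [applyPunct, List.foldl_append]

theorem applyPunct_cons_apos (qs l : List Char) :
    applyPunct ('\'' :: qs) l = applyPunct qs (PySem.Chars.replace l ['\'', 's'] []) := by
  simp [applyPunct, pvStep]

-- the String-level fold of port A computes applyPunct on the character lists
theorem foldA (ps : List Char) (t : String) :
    (ps.foldl
      (fun t c =>
        if c ≠ '\'' then PySem.Str.replace t (String.ofList [c]) " "
        else PySem.Str.replace t "'s" "") t).toList = applyPunct ps t.toList := by
  induction ps generalizing t with
  | nil => simp [applyPunct]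
  | cons c ps ih =>
    simp only [List.foldl_cons]
    rw [ih]
    simp only [applyPunct, List.foldl_cons]
    congr 1
    by_cases hc : c = '\''
    · subst hc
      simp [pvStep, PySem.Str.toList_replace, tl_aps]
    · simp [pvStep, hc, PySem.Str.toList_replace, tl_sp]

-- ===== VERDICT (by name: the statement is the Claim_ definition above) =====
theorem replaceAndCaseFolding_spec : Claim_equal_replaceAndCaseFolding := by
  intro text _
  unfold Spec_replaceAndCaseFolding
  apply String.toList_inj.mp
  unfold replaceAndCaseFolding replaceAndCaseFolding_alt
  rw [foldA]
  rw [show ("!\"#$%&'()*+,-./:;<=>?@[\\]^_`{|}~".toList) = pvPre ++ '\'' :: pvPost by decide]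
  rw [applyPunct_append, applyPunct_cons_apos]
  rw [PySem.Str.toList_replace, PySem.Str.toList_replace, tl_tab, tl_nl, tl_sp]
  rw [replace_single_subAll, replace_single_subAll]
  rw [applyPunct_no_apos pvPre (by decide) (by decide)]
  rw [rem_map (subAll pvPre) (subAll_h1 pvPre (by decide)) (subAll_h2 pvPre (by decide))]
  rw [rem_map (subAll ['\n']) (subAll_h1 ['\n'] (by decide)) (subAll_h2 ['\n'] (by decide))]
  rw [rem_map (subAll ['\t']) (subAll_h1 ['\t'] (by decide)) (subAll_h2 ['\t'] (by decide))]
  rw [applyPunct_no_apos pvPost (by decide) (by decide)]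
  rw [PySem.Str.toList_replace, tl_aps, tl_emp, String.toList_ofList]
  simp only [List.map_map]
  refine List.map_congr_left fun x _ => ?_
  simp only [Function.comp_apply]
  rw [subAll_comp ['\t'] ['\n'] (by decide), subAll_comp _ pvPre (by decide),
    subAll_comp _ pvPost (by decide)]
  show subAll _ x = pvTable x
  unfold subAll pvTable
  exact if_congr ((List.Perm.mem_iff (by decide)).trans Iff.rfl) rfl rfl
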